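-- pv_equiv track=rewrite | github.com/luizpetry/password-generator-python | app.py | check_char_policy
-- ===== SOURCE A (Python) =====
-- import string
--
-- def check_char_policy(password, uppercase, lowercase, numbers, symbols):
--     """Verifica se a senha está de acordo com as opções selecionadas."""
--     if uppercase and not any(c.isupper() for c in password):
--         return False
--     if lowercase and not any(c.islower() for c in password):
--         return False
--     if not numbers and any(c.isdigit() for c in password):
--         return False
--     if numbers and not any(c.isdigit() for c in password):
--         return False
--     if not symbols and any(c in string.punctuation for c in password):
--         return False
--     if symbols and not any(c in string.punctuation for c in password):
--         return False
--     return True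
-- ===== SOURCE B (Python) =====
-- import string
--
-- def check_char_policy(password, uppercase, lowercase, numbers, symbols):
--     """One pass over the password collecting class flags, then one flag-based policy check."""
--     has_upper = has_lower = has_digit = has_symbol = False
--     for c in password:
--         if c.isupper():
--             has_upper = True
--         if c.islower():
--             has_lower = True
--         if c.isdigit():
--             has_digit = True
--         if c in string.punctuation:
--             has_symbol = True
--     if uppercase and not has_upper:
--         return False
--     if lowercase and not has_lower:
--         return False
--     if has_digit != numbers:
--         return False
--     if has_symbol != symbols:
--         return False
--     return True
-- ===== Notes on version B (the rewrite author's own statement) =====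
-- stated objective: alternative
-- what changed: Replaces six separate short-circuiting any() scans of the password with a single summarize-then-check pass: one loop accumulates four character-class flags, and the six policy conditions collapse to flag comparisons (digit/symbol requirements become equality tests).
import Mathlib
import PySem

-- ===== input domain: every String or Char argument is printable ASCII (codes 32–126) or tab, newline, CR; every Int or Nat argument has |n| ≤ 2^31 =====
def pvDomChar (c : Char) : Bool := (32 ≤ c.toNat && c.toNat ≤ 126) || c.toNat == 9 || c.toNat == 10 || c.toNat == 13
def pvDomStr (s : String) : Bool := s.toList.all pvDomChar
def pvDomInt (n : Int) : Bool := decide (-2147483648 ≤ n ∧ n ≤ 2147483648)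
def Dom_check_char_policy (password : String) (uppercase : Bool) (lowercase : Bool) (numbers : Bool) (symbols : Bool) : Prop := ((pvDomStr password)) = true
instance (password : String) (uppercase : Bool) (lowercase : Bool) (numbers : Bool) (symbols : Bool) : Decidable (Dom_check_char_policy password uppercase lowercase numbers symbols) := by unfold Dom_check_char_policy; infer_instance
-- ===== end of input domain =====

-- B replaces A's six short-circuiting any() scans with a single flag-accumulating pass
-- followed by one flag-based policy check (alternative decomposition, same cost class).


-- string.punctuation (exact: the 32 ASCII punctuation characters)
def pvPunct : List Char := "!\"#$%&'()*+,-./:;<=>?@[\\]^_`{|}~".toList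

-- ===== PORT A =====
def check_char_policy (password : String) (uppercase : Bool) (lowercase : Bool) (numbers : Bool) (symbols : Bool) : Bool :=
  if uppercase && !(password.toList.any PySem.Chars.isupper) then false
  else if lowercase && !(password.toList.any PySem.Chars.islower) then false
  else if !numbers && password.toList.any PySem.Chars.isdigit then false
  else if numbers && !(password.toList.any PySem.Chars.isdigit) then false
  else if !symbols && password.toList.any (fun c => pvPunct.contains c) then false
  else if symbols && !(password.toList.any (fun c => pvPunct.contains c)) then false
  else true

-- ===== PORT B =====
-- one pass accumulating (has_upper, has_lower, has_digit, has_symbol)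
def pvStep (f : Bool × Bool × Bool × Bool) (c : Char) : Bool × Bool × Bool × Bool :=
  ( (if PySem.Chars.isupper c then true else f.1),
    (if PySem.Chars.islower c then true else f.2.1),
    (if PySem.Chars.isdigit c then true else f.2.2.1),
    (if pvPunct.contains c then true else f.2.2.2) )

def check_char_policy_alt (password : String) (uppercase : Bool) (lowercase : Bool) (numbers : Bool) (symbols : Bool) : Bool :=
  let f := password.toList.foldl pvStep (false, false, false, false)
  if uppercase && !f.1 then false
  else if lowercase && !f.2.1 then false
  else if f.2.2.1 != numbers then false
  else if f.2.2.2 != symbols then false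
  else true

-- ===== PRECONDITION & SPEC =====
def Spec_check_char_policy (password : String) (uppercase : Bool) (lowercase : Bool) (numbers : Bool) (symbols : Bool) (out : Bool) : Prop := out = check_char_policy_alt password uppercase lowercase numbers symbols
instance (password : String) (uppercase : Bool) (lowercase : Bool) (numbers : Bool) (symbols : Bool) (out : Bool) : Decidable (Spec_check_char_policy password uppercase lowercase numbers symbols out) := by unfold Spec_check_char_policy; infer_instance

-- ===== CLAIM (what is proved, stated in full; the proofs are below) =====
def Claim_equal_check_char_policy : Prop := ∀ (password : String) (uppercase : Bool) (lowercase : Bool) (numbers : Bool) (symbols : Bool), Dom_check_char_policy password uppercase lowercase numbers symbols → Spec_check_char_policy password uppercase lowercase numbers symbols (check_char_policy password uppercase lowercase numbers symbols)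

-- ===== LEMMAS AND PROOFS =====

-- the flag fold computes the four `any` values (each flag is the OR of its start value with an any)
theorem pvStep_foldl (l : List Char) (u v d s : Bool) :
    l.foldl pvStep (u, v, d, s) =
      (u || l.any PySem.Chars.isupper, v || l.any PySem.Chars.islower,
       d || l.any PySem.Chars.isdigit, s || l.any (fun c => pvPunct.contains c)) := by
  induction l generalizing u v d s with
  | nil => simp
  | cons c t ih =>
    simp only [List.foldl_cons, List.any_cons, pvStep, ih]
    cases hc : PySem.Chars.isupper c <;> cases PySem.Chars.islower c <;>
      cases PySem.Chars.isdigit c <;> cases pvPunct.contains c <;> simp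

-- ===== VERDICT (by name: the statement is the Claim_ definition above) =====
theorem check_char_policy_spec : Claim_equal_check_char_policy := by
  intro password uppercase lowercase numbers symbols _
  unfold Spec_check_char_policy check_char_policy check_char_policy_alt
  simp only [pvStep_foldl, Bool.false_or]
  cases uppercase <;> cases lowercase <;> cases numbers <;> cases symbols <;>
    cases password.toList.any PySem.Chars.isupper <;>
    cases password.toList.any PySem.Chars.islower <;>
    cases password.toList.any PySem.Chars.isdigit <;>
    cases password.toList.any (fun c => pvPunct.contains c) <;> rfl
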